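-- pv_equiv track=rewrite | github.com/MrBrantCode/unitest_baseline | mut_generate/mist_train_taco/taco_9146/solution.py | find_min_time_to_reach_bottom_right
-- ===== SOURCE A (Python) =====
-- import heapq
--
-- def find_min_time_to_reach_bottom_right(grid):
--     N = len(grid)
--     directions = [(0, 1), (1, 0), (0, -1), (-1, 0)]
--     min_heap = [(grid[0][0], 0, 0)]  # (elevation, row, col)
--     visited = set()
--
--     while min_heap:
--         t, r, c = heapq.heappop(min_heap)
--         if (r, c) == (N-1, N-1):
--             return t
--         if (r, c) in visited:
--             continue
--         visited.add((r, c))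
--
--         for dr, dc in directions:
--             nr, nc = r + dr, c + dc
--             if 0 <= nr < N and 0 <= nc < N and (nr, nc) not in visited:
--                 heapq.heappush(min_heap, (max(t, grid[nr][nc]), nr, nc))
--
--     return -1  # This should never be reached given the problem constraints
-- ===== SOURCE B (Python) =====
-- def find_min_time_to_reach_bottom_right(grid):
--     N = len(grid)
--     vals = sorted({grid[r][c] for r in range(N) for c in range(N)})
--
--     def reachable(v):
--         if grid[0][0] > v:
--             return False
--         R = {(0, 0)}
--         frontier = [(0, 0)]
--         while frontier:
--             new = []
--             for (r, c) in frontier: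
--                 for dr, dc in ((0, 1), (1, 0), (0, -1), (-1, 0)):
--                     nr, nc = r + dr, c + dc
--                     if 0 <= nr < N and 0 <= nc < N and (nr, nc) not in R \
--                             and grid[nr][nc] <= v:
--                         R.add((nr, nc))
--                         new.append((nr, nc))
--             frontier = new
--         return (N - 1, N - 1) in R
--
--     lo, hi = 0, len(vals) - 1
--     while lo < hi:
--         mid = (lo + hi) // 2
--         if reachable(vals[mid]):
--             hi = mid
--         else:
--             lo = mid + 1
--     return vals[lo]
-- ===== Notes on version B (the rewrite author's own statement) =====
-- stated objective: alternative
-- what changed: Replaces the heap-based Dijkstra (pop min bottleneck, relax neighbours) by a binary search over the sorted distinct elevations, deciding each probe threshold v with a BFS restricted to cells of elevation <= v.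
-- outside the precondition, e.g. on find_min_time_to_reach_bottom_right([[0, 9, 9], [0, 8], [0, 0, 0]]): A returns 0, B raises IndexError
import Mathlib
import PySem

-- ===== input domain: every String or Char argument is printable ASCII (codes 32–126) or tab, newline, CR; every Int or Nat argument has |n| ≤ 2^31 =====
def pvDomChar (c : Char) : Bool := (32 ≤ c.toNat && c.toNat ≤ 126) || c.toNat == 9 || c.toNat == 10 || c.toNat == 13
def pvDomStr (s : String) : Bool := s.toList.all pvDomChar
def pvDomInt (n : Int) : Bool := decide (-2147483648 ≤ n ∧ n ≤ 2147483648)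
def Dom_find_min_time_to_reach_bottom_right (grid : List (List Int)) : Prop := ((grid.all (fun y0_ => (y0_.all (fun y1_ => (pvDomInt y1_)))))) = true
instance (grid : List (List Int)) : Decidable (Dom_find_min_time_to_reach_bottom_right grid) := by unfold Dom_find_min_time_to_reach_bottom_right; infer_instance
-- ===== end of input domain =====

-- B replaces A's heap-based Dijkstra by a sorted threshold scan with a reachability fixed point
-- (alternative algorithm, not claimed faster). Return-value equivalence only; neither mutates.

-- ===== PORT A =====
-- shared helper: grid[r][c]; inside Pre_ every performed access is in range, so the getD default is never used
def pvElev (grid : List (List Int)) (r c : Int) : Int :=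
  PySem.List.pyGetD (PySem.List.pyGetD grid r []) c 0

def pvDirs : List (Int × Int) := [(0,1),(1,0),(0,-1),(-1,0)]

-- Python tuple comparison (t, r, c) <= (t', r', c')
def pvLexLe (a b : Int × Int × Int) : Bool :=
  a.1 < b.1 || (a.1 == b.1 && (a.2.1 < b.2.1 || (a.2.1 == b.2.1 && a.2.2 ≤ b.2.2)))

-- heapq modeled by a list kept sorted: heappush = ordered insert, heappop = take the head.
-- Exact here: heappop returns the least tuple, and only the heap's multiset is observable.
def pvHeapPush (x : Int × Int × Int) : List (Int × Int × Int) → List (Int × Int × Int)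
  | [] => [x]
  | y :: ys => if pvLexLe x y then x :: y :: ys else y :: pvHeapPush x ys

-- the while-loop of A; fuel is a totality guard only (the fuel supplied below is provably sufficient)
def pvALoop (grid : List (List Int)) (N : Int) :
    Nat → List (Int × Int × Int) → PySem.Set (Int × Int) → Int
  | 0, _, _ => -1
  | _ + 1, [], _ => -1
  | fuel + 1, (t, r, c) :: rest, visited =>
    if r == N - 1 && c == N - 1 then t
    else if PySem.Set.contains visited (r, c) then pvALoop grid N fuel rest visited
    else
      let visited' := PySem.Set.add visited (r, c)
      let heap' := pvDirs.foldl (fun h d =>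
        let nr := r + d.1
        let nc := c + d.2
        if (0 ≤ nr && nr < N && 0 ≤ nc && nc < N) && !(PySem.Set.contains visited' (nr, nc)) then
          pvHeapPush (max t (pvElev grid nr nc), nr, nc) h
        else h) rest
      pvALoop grid N fuel heap' visited'

def find_min_time_to_reach_bottom_right (grid : List (List Int)) : Int :=
  let N : Int := (grid.length : Int)
  pvALoop grid N (2 + 5 * grid.length * grid.length) [(pvElev grid 0 0, 0, 0)] PySem.Set.empty

-- ===== PORT B =====
-- one neighbour check of the BFS round (the body of the inner 'for dr, dc' loop):
-- state = (R, new); add the cell when in bounds, unseen and low enough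
def pvBfsStep (grid : List (List Int)) (N v : Int) (p : Int × Int)
    (acc : PySem.Set (Int × Int) × List (Int × Int)) (d : Int × Int) :
    PySem.Set (Int × Int) × List (Int × Int) :=
  let nr := p.1 + d.1
  let nc := p.2 + d.2
  if (0 ≤ nr && nr < N && 0 ≤ nc && nc < N) && !(PySem.Set.contains acc.1 (nr, nc)) &&
      pvElev grid nr nc ≤ v then
    (PySem.Set.add acc.1 (nr, nc), acc.2 ++ [(nr, nc)])
  else acc

-- one BFS round: expand every frontier cell; returns (R, new)
def pvBfsRound (grid : List (List Int)) (N v : Int) (frontier : List (Int × Int))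
    (R : PySem.Set (Int × Int)) : PySem.Set (Int × Int) × List (Int × Int) :=
  frontier.foldl (fun acc p => pvDirs.foldl (pvBfsStep grid N v p) acc)
    (R, ([] : List (Int × Int)))

-- the 'while frontier' loop; fuel is a totality guard only (N*N+2 provably suffices)
def pvBfsLoop (grid : List (List Int)) (N v : Int) :
    Nat → PySem.Set (Int × Int) → List (Int × Int) → PySem.Set (Int × Int)
  | 0, R, _ => R
  | _ + 1, R, [] => R
  | fuel + 1, R, p :: fr =>
    let step := pvBfsRound grid N v (p :: fr) R
    pvBfsLoop grid N v fuel step.1 step.2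

-- reachable(v): BFS from (0,0) over cells of elevation ≤ v, then test the corner
def pvReachable (grid : List (List Int)) (N v : Int) : Bool :=
  if pvElev grid 0 0 > v then false
  else
    let R := pvBfsLoop grid N v (grid.length * grid.length + 2)
      (PySem.Set.add PySem.Set.empty ((0 : Int), (0 : Int))) [((0 : Int), (0 : Int))]
    PySem.Set.contains R (N - 1, N - 1)

-- the 'while lo < hi' binary search; vals[i] is always in range inside Pre_, so the
-- pyGetD default is never used; fuel is a totality guard (len(vals)+1 provably suffices)
def pvBSearch (grid : List (List Int)) (N : Int) (vals : List Int) :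
    Nat → Int → Int → Int
  | 0, lo, _ => PySem.List.pyGetD vals lo 0
  | fuel + 1, lo, hi =>
    if lo < hi then
      let mid := PySem.Int.floordiv (lo + hi) 2
      if pvReachable grid N (PySem.List.pyGetD vals mid 0) then
        pvBSearch grid N vals fuel lo mid
      else
        pvBSearch grid N vals fuel (mid + 1) hi
    else PySem.List.pyGetD vals lo 0

def pvAllVals (grid : List (List Int)) : List Int :=
  (PySem.List.pyRange 0 (grid.length : Int)).flatMap (fun r =>
    (PySem.List.pyRange 0 (grid.length : Int)).map (fun c => pvElev grid r c))

def find_min_time_to_reach_bottom_right_alt (grid : List (List Int)) : Int :=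
  let N : Int := (grid.length : Int)
  let vals := PySem.List.sorted (PySem.Set.ofList (pvAllVals grid)) (fun x => x)
  pvBSearch grid N vals (vals.length + 1) 0 ((vals.length : Int) - 1)

-- ===== PRECONDITION & SPEC =====
-- Pre_ excludes the empty grid and ragged grids having a row shorter than len(grid): A reads an
-- N×N square and raises IndexError there (on rare ragged grids the traversal happens to skip the
-- short row and A returns — see the cite). Rows longer than len(grid) stay inside Pre_.
def Pre_find_min_time_to_reach_bottom_right (grid : List (List Int)) : Prop :=
  grid ≠ [] ∧ ∀ row ∈ grid, grid.length ≤ row.length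
instance (grid : List (List Int)) : Decidable (Pre_find_min_time_to_reach_bottom_right grid) := by
  unfold Pre_find_min_time_to_reach_bottom_right; infer_instance

def pvWitness_find_min_time_to_reach_bottom_right : List (List Int) := [[0]]

def Spec_find_min_time_to_reach_bottom_right (grid : List (List Int)) (out : Int) : Prop := out = find_min_time_to_reach_bottom_right_alt grid
instance (grid : List (List Int)) (out : Int) : Decidable (Spec_find_min_time_to_reach_bottom_right grid out) := by unfold Spec_find_min_time_to_reach_bottom_right; infer_instance

-- ===== CLAIM (what is proved, stated in full; the proofs are below) =====
def Claim_equal_find_min_time_to_reach_bottom_right : Prop := ∀ (grid : List (List Int)), Dom_find_min_time_to_reach_bottom_right grid → Pre_find_min_time_to_reach_bottom_right grid → Spec_find_min_time_to_reach_bottom_right grid (find_min_time_to_reach_bottom_right grid)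

-- ===== LEMMAS AND PROOFS =====

-- in-bounds cells, the four-neighbour relation, and reachability within threshold T
def pvInB (N : Int) (p : Int × Int) : Prop := 0 ≤ p.1 ∧ p.1 < N ∧ 0 ≤ p.2 ∧ p.2 < N


def pvAdj (p q : Int × Int) : Prop := ∃ d ∈ pvDirs, q = (p.1 + d.1, p.2 + d.2)

inductive pvRA (grid : List (List Int)) (N T : Int) : Int × Int → Prop
  | base : pvElev grid 0 0 ≤ T → pvRA grid N T (0, 0)
  | step {p q} : pvRA grid N T p → pvAdj p q → pvInB N q → pvElev grid q.1 q.2 ≤ T →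
      pvRA grid N T q

-- a walk from y to x whose cells after y are in bounds, of elevation ≤ T, and avoid V
inductive pvChain (grid : List (List Int)) (N T : Int) (V : List (Int × Int)) :
    Int × Int → Int × Int → Prop
  | refl (p) : pvChain grid N T V p p
  | step {p q z} : pvAdj p q → pvInB N q → pvElev grid q.1 q.2 ≤ T → q ∉ V →
      pvChain grid N T V q z → pvChain grid N T V p z

lemma pvRA_mono {grid : List (List Int)} {N T T' : Int} {x : Int × Int}
    (h : pvRA grid N T x) (hT : T ≤ T') : pvRA grid N T' x := by
  induction h with
  | base h => exact pvRA.base (le_trans h hT)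
  | step _ ha hb he ih => exact pvRA.step ih ha hb (le_trans he hT)

lemma pvRA_e00 {grid : List (List Int)} {N T : Int} {x : Int × Int}
    (h : pvRA grid N T x) : pvElev grid 0 0 ≤ T := by
  induction h with
  | base h => exact h
  | step _ _ _ _ ih => exact ih

lemma pvChain_snoc {grid : List (List Int)} {N T : Int} {V : List (Int × Int)}
    {y p q : Int × Int} (h : pvChain grid N T V y p) (ha : pvAdj p q) (hb : pvInB N q)
    (he : pvElev grid q.1 q.2 ≤ T) (hv : q ∉ V) : pvChain grid N T V y q := by
  induction h with
  | refl p => exact pvChain.step ha hb he hv (pvChain.refl _)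
  | step ha' hb' he' hv' _ ih => exact pvChain.step ha' hb' he' hv' (ih ha)

lemma pvRA_chain {grid : List (List Int)} {N T : Int} {x : Int × Int}
    (h : pvRA grid N T x) : pvChain grid N T [] (0, 0) x := by
  induction h with
  | base _ => exact pvChain.refl _
  | step _ ha hb he ih => exact pvChain_snoc ih ha hb he (List.not_mem_nil)

lemma pvChain_extend {grid : List (List Int)} {N T : Int} {V : List (Int × Int)}
    {y x p : Int × Int} (h : pvChain grid N T V y x) (hx : x ≠ p) :
    (y ≠ p ∧ pvChain grid N T (V ++ [p]) y x) ∨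
    ∃ w, pvAdj p w ∧ pvInB N w ∧ pvElev grid w.1 w.2 ≤ T ∧ w ∉ V ++ [p] ∧
      pvChain grid N T (V ++ [p]) w x := by
  induction h with
  | refl p' => exact Or.inl ⟨hx, pvChain.refl _⟩
  | @step y' u z ha hb he hv hch ih =>
    rcases ih hx with ⟨hune, hch'⟩ | hr
    · by_cases hyp : y' = p
      · subst hyp
        exact Or.inr ⟨u, ha, hb, he, by simp [hv, hune], hch'⟩
      · exact Or.inl ⟨hyp, pvChain.step ha hb he (by simp [hv, hune]) hch'⟩
    · exact Or.inr hr

lemma pvElev_mem_allVals {grid : List (List Int)} {p : Int × Int}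
    (hb : pvInB (grid.length : Int) p) : pvElev grid p.1 p.2 ∈ pvAllVals grid := by
  obtain ⟨h1, h2, h3, h4⟩ := hb
  unfold pvAllVals
  rw [List.mem_flatMap]
  exact ⟨p.1, PySem.List.mem_pyRange_one.mpr ⟨h1, h2⟩,
    List.mem_map.mpr ⟨p.2, PySem.List.mem_pyRange_one.mpr ⟨h3, h4⟩, rfl⟩⟩

lemma pvRA_maxval {grid : List (List Int)} {T : Int} {x : Int × Int}
    (h0 : 0 < grid.length) (h : pvRA grid (grid.length : Int) T x) :
    ∃ v ∈ pvAllVals grid, v ≤ T ∧ pvRA grid (grid.length : Int) v x := by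
  induction h with
  | base h =>
    refine ⟨pvElev grid 0 0, pvElev_mem_allVals (p := ((0 : Int), (0 : Int))) ⟨le_refl _, by show (0:Int) < _; exact_mod_cast h0, le_refl _, by show (0:Int) < _; exact_mod_cast h0⟩, h, pvRA.base (le_refl _)⟩
  | @step p q _ ha hb he ih =>
    obtain ⟨vp, hmem, hle, hra⟩ := ih
    refine ⟨max vp (pvElev grid q.1 q.2), ?_, max_le hle he, ?_⟩
    · rcases max_choice vp (pvElev grid q.1 q.2) with h | h <;> rw [h]
      · exact hmem
      · exact pvElev_mem_allVals hb
    · exact pvRA.step (pvRA_mono hra (le_max_left _ _)) ha hb (le_max_right _ _)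

-- whole-grid connectivity at a big enough threshold
lemma pvRA_exists {grid : List (List Int)} (h0 : 0 < grid.length) :
    ∃ T, pvRA grid (grid.length : Int) T ((grid.length : Int) - 1, (grid.length : Int) - 1) := by
  have h0' : (0 : Int) < (grid.length : Int) := by exact_mod_cast h0
  refine ⟨(pvAllVals grid).foldl max (pvElev grid 0 0), ?_⟩
  set T := (pvAllVals grid).foldl max (pvElev grid 0 0) with hT
  have hE : ∀ p : Int × Int, pvInB (grid.length : Int) p → pvElev grid p.1 p.2 ≤ T :=
    fun p hb => (PySem.List.le_foldl_max (pvAllVals grid) (pvElev grid 0 0)).2 _ (pvElev_mem_allVals hb)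
  have h00 : pvElev grid 0 0 ≤ T := (PySem.List.le_foldl_max (pvAllVals grid) (pvElev grid 0 0)).1
  have hrow : ∀ j : Nat, (j : Int) < (grid.length : Int) → pvRA grid (grid.length : Int) T ((0 : Int), (j : Int)) := by
    intro j
    induction j with
    | zero => intro _; exact pvRA.base h00
    | succ j ih =>
      intro hj
      have hj' : (j : Int) < (grid.length : Int) := by push_cast at hj ⊢; omega
      have hb : pvInB (grid.length : Int) ((0 : Int), ((j + 1 : Nat) : Int)) :=
        ⟨le_refl _, h0', by positivity, hj⟩
      refine pvRA.step (ih hj') ⟨(0, 1), by simp [pvDirs], ?_⟩ hb (hE _ hb)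
      simp
  have hcol : ∀ i : Nat, (i : Int) < (grid.length : Int) → pvRA grid (grid.length : Int) T ((i : Int), (grid.length : Int) - 1) := by
    intro i
    induction i with
    | zero =>
      intro _
      have hcast : ((grid.length - 1 : Nat) : Int) = (grid.length : Int) - 1 := by omega
      have := hrow (grid.length - 1) (by omega)
      rwa [hcast] at this
    | succ i ih =>
      intro hi
      have hi' : (i : Int) < (grid.length : Int) := by push_cast at hi ⊢; omega
      have hb : pvInB (grid.length : Int) (((i + 1 : Nat) : Int), (grid.length : Int) - 1) :=
        ⟨by positivity, hi, by omega, by omega⟩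
      refine pvRA.step (ih hi') ⟨(1, 0), by simp [pvDirs], ?_⟩ hb (hE _ hb)
      simp
  have hcast : ((grid.length - 1 : Nat) : Int) = (grid.length : Int) - 1 := by omega
  have := hcol (grid.length - 1) (by omega)
  rwa [hcast] at this

lemma pv_card_bound {n : Nat} {l : List (Int × Int)} (hn : l.Nodup)
    (hb : ∀ p ∈ l, pvInB (n : Int) p) : l.length ≤ n * n := by
  have hsub : l.toFinset ⊆
      (Finset.range n ×ˢ Finset.range n).image (fun q : Nat × Nat => ((q.1 : Int), (q.2 : Int))) := by
    intro p hp
    rw [List.mem_toFinset] at hp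
    obtain ⟨h1, h2, h3, h4⟩ := hb p hp
    rw [Finset.mem_image]
    refine ⟨(p.1.toNat, p.2.toNat), ?_, ?_⟩
    · rw [Finset.mem_product]; constructor <;> rw [Finset.mem_range] <;> omega
    · cases p; simp [Prod.ext_iff]; constructor <;> omega
  calc l.length = l.toFinset.card := (List.toFinset_card_of_nodup hn).symm
    _ ≤ _ := Finset.card_le_card hsub
    _ ≤ (Finset.range n ×ˢ Finset.range n).card := Finset.card_image_le
    _ = n * n := by rw [Finset.card_product]; simp

-- ---- boolean bridges ----
lemma pvInB_bool {N nr nc : Int} :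
    ((0 ≤ nr && nr < N && 0 ≤ nc && nc < N) = true) ↔ pvInB N (nr, nc) := by
  simp [pvInB]; tauto

lemma pvLexLe_total (a b : Int × Int × Int) : pvLexLe a b = true ∨ pvLexLe b a = true := by
  obtain ⟨a1, a2, a3⟩ := a; obtain ⟨b1, b2, b3⟩ := b
  simp [pvLexLe]; omega

lemma pvLexLe_fst {a b : Int × Int × Int} (h : pvLexLe a b = true) : a.1 ≤ b.1 := by
  obtain ⟨a1, a2, a3⟩ := a; obtain ⟨b1, b2, b3⟩ := b
  simp [pvLexLe] at h; omega

lemma pvLexLe_trans {a b c : Int × Int × Int} (h1 : pvLexLe a b = true)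
    (h2 : pvLexLe b c = true) : pvLexLe a c = true := by
  obtain ⟨a1, a2, a3⟩ := a; obtain ⟨b1, b2, b3⟩ := b; obtain ⟨c1, c2, c3⟩ := c
  simp [pvLexLe] at h1 h2 ⊢; omega

-- ---- heap push facts ----
lemma pvHeapPush_mem {x z : Int × Int × Int} : ∀ {h : List (Int × Int × Int)},
    z ∈ pvHeapPush x h ↔ z = x ∨ z ∈ h := by
  intro h
  induction h with
  | nil => simp [pvHeapPush]
  | cons y ys ih =>
    simp only [pvHeapPush]
    split
    · simp [List.mem_cons]
    · simp only [List.mem_cons, ih]; tauto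

lemma pvHeapPush_len (x : Int × Int × Int) : ∀ (h : List (Int × Int × Int)),
    (pvHeapPush x h).length = h.length + 1 := by
  intro h
  induction h with
  | nil => simp [pvHeapPush]
  | cons y ys ih =>
    simp only [pvHeapPush]
    split
    · simp
    · simp [ih]

lemma pvHeapPush_sorted {x : Int × Int × Int} : ∀ {h : List (Int × Int × Int)},
    h.Pairwise (fun a b => pvLexLe a b = true) →
    (pvHeapPush x h).Pairwise (fun a b => pvLexLe a b = true) := by
  intro h
  induction h with
  | nil => intro _; simp [pvHeapPush]
  | cons y ys ih =>
    intro hp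
    rw [List.pairwise_cons] at hp
    obtain ⟨hy, hys⟩ := hp
    simp only [pvHeapPush]
    split
    · rename_i hxy
      rw [List.pairwise_cons]
      refine ⟨?_, List.pairwise_cons.mpr ⟨hy, hys⟩⟩
      intro z hz
      rcases List.mem_cons.mp hz with rfl | hz
      · exact hxy
      · exact pvLexLe_trans hxy (hy z hz)
    · rename_i hxy
      have hyx : pvLexLe y x = true := (pvLexLe_total x y).resolve_left (by simpa using hxy)
      rw [List.pairwise_cons]
      refine ⟨?_, ih hys⟩
      intro z hz
      rcases pvHeapPush_mem.mp hz with rfl | hz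
      · exact hyx
      · exact hy z hz

-- ---- generic facts about the push fold in A ----
lemma pvFoldPush_mem_acc {g : Int × Int → Bool} {e : Int × Int → Int × Int × Int} :
    ∀ (l : List (Int × Int)) (acc : List (Int × Int × Int)) (z : Int × Int × Int), z ∈ acc →
      z ∈ l.foldl (fun h d => if g d then pvHeapPush (e d) h else h) acc := by
  intro l
  induction l with
  | nil => intro acc z h; simpa using h
  | cons d0 l ih =>
    intro acc z h
    rw [List.foldl_cons]
    apply ih
    show z ∈ (if g d0 = true then pvHeapPush (e d0) acc else acc)
    split_ifs
    · exact pvHeapPush_mem.mpr (Or.inr h)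
    · exact h

lemma pvFoldPush_pushed {g : Int × Int → Bool} {e : Int × Int → Int × Int × Int}
    {d : Int × Int} : ∀ (l : List (Int × Int)) (acc : List (Int × Int × Int)), d ∈ l →
      g d = true → e d ∈ l.foldl (fun h d => if g d then pvHeapPush (e d) h else h) acc := by
  intro l
  induction l with
  | nil => intro acc h; exact absurd h (List.not_mem_nil)
  | cons d0 l ih =>
    intro acc hd hg
    rw [List.foldl_cons]
    rcases List.mem_cons.mp hd with rfl | hd'
    · apply pvFoldPush_mem_acc
      show e d ∈ (if g d = true then pvHeapPush (e d) acc else acc)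
      rw [if_pos hg]
      exact pvHeapPush_mem.mpr (Or.inl rfl)
    · exact ih _ hd' hg

lemma pvFoldPush_char {g : Int × Int → Bool} {e : Int × Int → Int × Int × Int} :
    ∀ (l : List (Int × Int)) (acc : List (Int × Int × Int)) (z : Int × Int × Int),
      z ∈ l.foldl (fun h d => if g d then pvHeapPush (e d) h else h) acc →
      z ∈ acc ∨ ∃ d ∈ l, g d = true ∧ z = e d := by
  intro l
  induction l with
  | nil => intro acc z h; exact Or.inl (by simpa using h)
  | cons d0 l ih =>
    intro acc z h
    rw [List.foldl_cons] at h
    rcases ih _ _ h with hacc | ⟨d, hdl, hgd, rfl⟩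
    · have hacc' : z ∈ (if g d0 = true then pvHeapPush (e d0) acc else acc) := hacc
      split_ifs at hacc' with hg
      · rcases pvHeapPush_mem.mp hacc' with rfl | hz
        · exact Or.inr ⟨d0, List.mem_cons_self, hg, rfl⟩
        · exact Or.inl hz
      · exact Or.inl hacc'
    · exact Or.inr ⟨d, List.mem_cons_of_mem _ hdl, hgd, rfl⟩

lemma pvFoldPush_len {g : Int × Int → Bool} {e : Int × Int → Int × Int × Int} :
    ∀ (l : List (Int × Int)) (acc : List (Int × Int × Int)),
      (l.foldl (fun h d => if g d then pvHeapPush (e d) h else h) acc).length ≤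
        acc.length + l.length := by
  intro l
  induction l with
  | nil => intro acc; simp
  | cons d0 l ih =>
    intro acc
    rw [List.foldl_cons]
    refine le_trans (ih _) ?_
    have h1 : (if g d0 = true then pvHeapPush (e d0) acc else acc).length ≤ acc.length + 1 := by
      split_ifs
      · rw [pvHeapPush_len]
      · omega
    simp only [List.length_cons]
    omega

lemma pvFoldPush_sorted {g : Int × Int → Bool} {e : Int × Int → Int × Int × Int} :
    ∀ (l : List (Int × Int)) (acc : List (Int × Int × Int)),
      acc.Pairwise (fun a b => pvLexLe a b = true) →
      (l.foldl (fun h d => if g d then pvHeapPush (e d) h else h) acc).Pairwise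
        (fun a b => pvLexLe a b = true) := by
  intro l
  induction l with
  | nil => intro acc h; simpa using h
  | cons d0 l ih =>
    intro acc h
    rw [List.foldl_cons]
    apply ih
    show ((if g d0 = true then pvHeapPush (e d0) acc else acc)).Pairwise (fun a b => pvLexLe a b = true)
    split_ifs
    · exact pvHeapPush_sorted h
    · exact h

-- ---- generic facts about the add folds in B ----
-- ---- facts about one neighbour check of the BFS round ----
lemma pvBfsStep_facts (grid : List (List Int)) (N v : Int) (p : Int × Int)
    (acc : PySem.Set (Int × Int) × List (Int × Int)) (d : Int × Int) :
    (∀ x ∈ acc.1, x ∈ (pvBfsStep grid N v p acc d).1) ∧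
    (∀ x ∈ (pvBfsStep grid N v p acc d).1,
      x ∈ acc.1 ∨ (x = (p.1 + d.1, p.2 + d.2) ∧ pvInB N x ∧ pvElev grid x.1 x.2 ≤ v)) ∧
    (pvInB N (p.1 + d.1, p.2 + d.2) → pvElev grid (p.1 + d.1) (p.2 + d.2) ≤ v →
      (p.1 + d.1, p.2 + d.2) ∈ (pvBfsStep grid N v p acc d).1) ∧
    (∀ x ∈ (pvBfsStep grid N v p acc d).2, x ∈ acc.2 ∨ x ∈ (pvBfsStep grid N v p acc d).1) ∧
    (acc.1.Nodup → (pvBfsStep grid N v p acc d).1.Nodup) ∧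
    ((pvBfsStep grid N v p acc d).1.length + acc.2.length =
      acc.1.length + (pvBfsStep grid N v p acc d).2.length) ∧
    (∀ x ∈ acc.2, x ∈ (pvBfsStep grid N v p acc d).2) ∧
    (∀ x ∈ (pvBfsStep grid N v p acc d).1, x ∈ acc.1 ∨ x ∈ (pvBfsStep grid N v p acc d).2) := by
  by_cases hmem : (p.1 + d.1, p.2 + d.2) ∈ acc.1
  · have hc : PySem.Set.contains acc.1 (p.1 + d.1, p.2 + d.2) = true :=
      (PySem.Set.contains_iff _ _).mpr hmem
    have hcond : ((0 ≤ p.1 + d.1 && p.1 + d.1 < N && 0 ≤ p.2 + d.2 && p.2 + d.2 < N) &&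
        !(PySem.Set.contains acc.1 (p.1 + d.1, p.2 + d.2)) &&
        decide (pvElev grid (p.1 + d.1) (p.2 + d.2) ≤ v)) = false := by
      simp only [Bool.and_eq_false_iff]
      simp
      exact Or.inl (Or.inr hmem)
    have hstep : pvBfsStep grid N v p acc d = acc := by
      simp only [pvBfsStep]
      rw [if_neg (by rw [hcond]; exact Bool.false_ne_true)]
    rw [hstep]
    exact ⟨fun x h => h, fun x h => Or.inl h, fun _ _ => hmem, fun x h => Or.inl h,
      fun h => h, by omega, fun x h => h, fun x h => Or.inl h⟩
  · have hc : PySem.Set.contains acc.1 (p.1 + d.1, p.2 + d.2) = false :=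
      Bool.eq_false_iff.mpr (fun hx => hmem ((PySem.Set.contains_iff _ _).mp hx))
    by_cases hg : pvInB N (p.1 + d.1, p.2 + d.2) ∧ pvElev grid (p.1 + d.1) (p.2 + d.2) ≤ v
    · have hstep : pvBfsStep grid N v p acc d =
          (acc.1 ++ [(p.1 + d.1, p.2 + d.2)], acc.2 ++ [(p.1 + d.1, p.2 + d.2)]) := by
        have hbnd := hg.1
        simp only [pvInB] at hbnd
        simp [pvBfsStep, hbnd, hg.2, PySem.Set.add, hmem]
      rw [hstep]
      refine ⟨?_, ?_, ?_, ?_, ?_, ?_, ?_, ?_⟩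
      · intro x h; exact List.mem_append.mpr (Or.inl h)
      · intro x h
        rcases List.mem_append.mp h with h | h
        · exact Or.inl h
        · rw [List.mem_singleton] at h
          subst h
          exact Or.inr ⟨rfl, hg.1, hg.2⟩
      · intro _ _; exact List.mem_append.mpr (Or.inr (List.mem_singleton.mpr rfl))
      · intro x h
        rcases List.mem_append.mp h with h | h
        · exact Or.inl h
        · exact Or.inr (List.mem_append.mpr (Or.inr h))
      · intro hnd
        simp only [List.nodup_append, List.nodup_singleton, true_and]
        refine ⟨hnd, ?_⟩
        intro a ha b hb heq
        rw [List.mem_singleton] at hb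
        subst hb; subst heq
        exact hmem ha
      · simp only [List.length_append, List.length_singleton]
        omega
      · intro x h; exact List.mem_append.mpr (Or.inl h)
      · intro x h
        rcases List.mem_append.mp h with h | h
        · exact Or.inl h
        · exact Or.inr (List.mem_append.mpr (Or.inr h))
    · have hcond : ((0 ≤ p.1 + d.1 && p.1 + d.1 < N && 0 ≤ p.2 + d.2 && p.2 + d.2 < N) &&
          !(PySem.Set.contains acc.1 (p.1 + d.1, p.2 + d.2)) &&
          decide (pvElev grid (p.1 + d.1) (p.2 + d.2) ≤ v)) = false := by
        by_cases hbnd : pvInB N (p.1 + d.1, p.2 + d.2)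
        · have helev : ¬ pvElev grid (p.1 + d.1) (p.2 + d.2) ≤ v := fun h => hg ⟨hbnd, h⟩
          simp [helev]
        · have hb : (0 ≤ p.1 + d.1 && p.1 + d.1 < N && 0 ≤ p.2 + d.2 && p.2 + d.2 < N) = false :=
            Bool.eq_false_iff.mpr (fun hx => hbnd (pvInB_bool.mp hx))
          simp [hb]
      have hstep : pvBfsStep grid N v p acc d = acc := by
        simp only [pvBfsStep]
        rw [if_neg (by rw [hcond]; exact Bool.false_ne_true)]
      rw [hstep]
      refine ⟨fun x h => h, fun x h => Or.inl h, ?_, fun x h => Or.inl h,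
        fun h => h, by omega, fun x h => h, fun x h => Or.inl h⟩
      intro hb he
      exact absurd ⟨hb, he⟩ hg

-- ---- the same facts through the inner fold over the four directions ----
lemma pvBfsInner_facts (grid : List (List Int)) (N v : Int) (p : Int × Int) :
    ∀ (l : List (Int × Int)) (acc : PySem.Set (Int × Int) × List (Int × Int)),
    (∀ x ∈ acc.1, x ∈ (l.foldl (pvBfsStep grid N v p) acc).1) ∧
    (∀ x ∈ (l.foldl (pvBfsStep grid N v p) acc).1,
      x ∈ acc.1 ∨ ∃ d ∈ l, x = (p.1 + d.1, p.2 + d.2) ∧ pvInB N x ∧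
        pvElev grid x.1 x.2 ≤ v) ∧
    (∀ d ∈ l, pvInB N (p.1 + d.1, p.2 + d.2) → pvElev grid (p.1 + d.1) (p.2 + d.2) ≤ v →
      (p.1 + d.1, p.2 + d.2) ∈ (l.foldl (pvBfsStep grid N v p) acc).1) ∧
    (∀ x ∈ (l.foldl (pvBfsStep grid N v p) acc).2,
      x ∈ acc.2 ∨ x ∈ (l.foldl (pvBfsStep grid N v p) acc).1) ∧
    (acc.1.Nodup → (l.foldl (pvBfsStep grid N v p) acc).1.Nodup) ∧
    ((l.foldl (pvBfsStep grid N v p) acc).1.length + acc.2.length =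
      acc.1.length + (l.foldl (pvBfsStep grid N v p) acc).2.length) ∧
    (∀ x ∈ acc.2, x ∈ (l.foldl (pvBfsStep grid N v p) acc).2) ∧
    (∀ x ∈ (l.foldl (pvBfsStep grid N v p) acc).1,
      x ∈ acc.1 ∨ x ∈ (l.foldl (pvBfsStep grid N v p) acc).2) := by
  intro l
  induction l with
  | nil =>
    intro acc
    exact ⟨fun x h => h, fun x h => Or.inl h, fun d hd => absurd hd (List.not_mem_nil),
      fun x h => Or.inl h, fun h => h, by simp, fun x h => h, fun x h => Or.inl h⟩
  | cons d0 l ih =>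
    intro acc
    obtain ⟨s1, s2, s3, s4, s5, s6, s7, s8⟩ := pvBfsStep_facts grid N v p acc d0
    obtain ⟨i1, i2, i3, i4, i5, i6, i7, i8⟩ := ih (pvBfsStep grid N v p acc d0)
    rw [List.foldl_cons]
    refine ⟨?_, ?_, ?_, ?_, ?_, ?_, ?_, ?_⟩
    · intro x h; exact i1 x (s1 x h)
    · intro x h
      rcases i2 x h with h' | ⟨d, hd, hrest⟩
      · rcases s2 x h' with h'' | ⟨hx, hb, he⟩
        · exact Or.inl h''
        · exact Or.inr ⟨d0, List.mem_cons_self, hx, hb, he⟩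
      · exact Or.inr ⟨d, List.mem_cons_of_mem _ hd, hrest⟩
    · intro d hd hb he
      rcases List.mem_cons.mp hd with rfl | hd'
      · exact i1 _ (s3 hb he)
      · exact i3 d hd' hb he
    · intro x h
      rcases i4 x h with h' | h'
      · rcases s4 x h' with h'' | h''
        · exact Or.inl h''
        · exact Or.inr (i1 x h'')
      · exact Or.inr h'
    · intro h; exact i5 (s5 h)
    · omega
    · intro x h; exact i7 x (s7 x h)
    · intro x h
      rcases i8 x h with h' | h'
      · rcases s8 x h' with h'' | h''
        · exact Or.inl h''
        · exact Or.inr (i7 x h'')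
      · exact Or.inr h'

-- ---- and through the outer fold over the frontier ----
lemma pvBfsOuter_facts (grid : List (List Int)) (N v : Int) :
    ∀ (fr : List (Int × Int)) (acc : PySem.Set (Int × Int) × List (Int × Int)),
    (∀ x ∈ acc.1,
      x ∈ (fr.foldl (fun acc p => pvDirs.foldl (pvBfsStep grid N v p) acc) acc).1) ∧
    (∀ x ∈ (fr.foldl (fun acc p => pvDirs.foldl (pvBfsStep grid N v p) acc) acc).1,
      x ∈ acc.1 ∨ ∃ p ∈ fr, pvAdj p x ∧ pvInB N x ∧ pvElev grid x.1 x.2 ≤ v) ∧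
    (∀ p ∈ fr, ∀ d ∈ pvDirs,
      pvInB N (p.1 + d.1, p.2 + d.2) → pvElev grid (p.1 + d.1) (p.2 + d.2) ≤ v →
      (p.1 + d.1, p.2 + d.2) ∈
        (fr.foldl (fun acc p => pvDirs.foldl (pvBfsStep grid N v p) acc) acc).1) ∧
    (∀ x ∈ (fr.foldl (fun acc p => pvDirs.foldl (pvBfsStep grid N v p) acc) acc).2,
      x ∈ acc.2 ∨
        x ∈ (fr.foldl (fun acc p => pvDirs.foldl (pvBfsStep grid N v p) acc) acc).1) ∧
    (acc.1.Nodup →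
      (fr.foldl (fun acc p => pvDirs.foldl (pvBfsStep grid N v p) acc) acc).1.Nodup) ∧
    ((fr.foldl (fun acc p => pvDirs.foldl (pvBfsStep grid N v p) acc) acc).1.length +
        acc.2.length =
      acc.1.length +
        (fr.foldl (fun acc p => pvDirs.foldl (pvBfsStep grid N v p) acc) acc).2.length) ∧
    (∀ x ∈ acc.2,
      x ∈ (fr.foldl (fun acc p => pvDirs.foldl (pvBfsStep grid N v p) acc) acc).2) ∧
    (∀ x ∈ (fr.foldl (fun acc p => pvDirs.foldl (pvBfsStep grid N v p) acc) acc).1,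
      x ∈ acc.1 ∨
        x ∈ (fr.foldl (fun acc p => pvDirs.foldl (pvBfsStep grid N v p) acc) acc).2) := by
  intro fr
  induction fr with
  | nil =>
    intro acc
    exact ⟨fun x h => h, fun x h => Or.inl h, fun p hp => absurd hp (List.not_mem_nil),
      fun x h => Or.inl h, fun h => h, by simp, fun x h => h, fun x h => Or.inl h⟩
  | cons p0 fr ih =>
    intro acc
    obtain ⟨s1, s2, s3, s4, s5, s6, s7, s8⟩ := pvBfsInner_facts grid N v p0 pvDirs acc
    obtain ⟨i1, i2, i3, i4, i5, i6, i7, i8⟩ := ih (pvDirs.foldl (pvBfsStep grid N v p0) acc)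
    rw [List.foldl_cons]
    refine ⟨?_, ?_, ?_, ?_, ?_, ?_, ?_, ?_⟩
    · intro x h; exact i1 x (s1 x h)
    · intro x h
      rcases i2 x h with h' | ⟨p, hp, hrest⟩
      · rcases s2 x h' with h'' | ⟨d, hd, hx, hb, he⟩
        · exact Or.inl h''
        · exact Or.inr ⟨p0, List.mem_cons_self, ⟨d, hd, hx⟩, hb, he⟩
      · exact Or.inr ⟨p, List.mem_cons_of_mem _ hp, hrest⟩
    · intro p hp d hd hb he
      rcases List.mem_cons.mp hp with rfl | hp'
      · exact i1 _ (s3 d hd hb he)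
      · exact i3 p hp' d hd hb he
    · intro x h
      rcases i4 x h with h' | h'
      · rcases s4 x h' with h'' | h''
        · exact Or.inl h''
        · exact Or.inr (i1 x h'')
      · exact Or.inr h'
    · intro h; exact i5 (s5 h)
    · omega
    · intro x h; exact i7 x (s7 x h)
    · intro x h
      rcases i8 x h with h' | h'
      · rcases s8 x h' with h'' | h''
        · exact Or.inl h''
        · exact Or.inr (i7 x h'')
      · exact Or.inr h'

-- a set closed under admissible expansion that contains the start absorbs all of pvRA
lemma pvRA_in_closed {grid : List (List Int)} {N v : Int} {F : PySem.Set (Int × Int)}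
    (hcl : ∀ p ∈ F, ∀ d ∈ pvDirs,
      pvInB N (p.1 + d.1, p.2 + d.2) → pvElev grid (p.1 + d.1) (p.2 + d.2) ≤ v →
      (p.1 + d.1, p.2 + d.2) ∈ F)
    (h00 : ((0 : Int), (0 : Int)) ∈ F) :
    ∀ x, pvRA grid N v x → x ∈ F := by
  intro x h
  induction h with
  | base _ => exact h00
  | @step p q hp ha hb he ih =>
    obtain ⟨d, hd, rfl⟩ := ha
    exact hcl p ih d hd hb he

-- the BFS loop: its result contains the start set, is sound, and is closed
lemma pvBfsLoop_master {grid : List (List Int)} {v : Int} :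
    ∀ (fuel : Nat) (R : PySem.Set (Int × Int)) (frontier : List (Int × Int)),
      (∀ x ∈ R, pvRA grid (grid.length : Int) v x) →
      (∀ p ∈ frontier, p ∈ R) →
      (∀ p ∈ R, p ∉ frontier → ∀ d ∈ pvDirs,
        pvInB (grid.length : Int) (p.1 + d.1, p.2 + d.2) →
        pvElev grid (p.1 + d.1) (p.2 + d.2) ≤ v →
        (p.1 + d.1, p.2 + d.2) ∈ R) →
      R.Nodup → (∀ p ∈ R, pvInB (grid.length : Int) p) →
      grid.length * grid.length + 2 ≤ fuel + R.length →
      (∀ x ∈ R, x ∈ pvBfsLoop grid (grid.length : Int) v fuel R frontier) ∧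
      (∀ x ∈ pvBfsLoop grid (grid.length : Int) v fuel R frontier,
        pvRA grid (grid.length : Int) v x) ∧
      (∀ p ∈ pvBfsLoop grid (grid.length : Int) v fuel R frontier, ∀ d ∈ pvDirs,
        pvInB (grid.length : Int) (p.1 + d.1, p.2 + d.2) →
        pvElev grid (p.1 + d.1) (p.2 + d.2) ≤ v →
        (p.1 + d.1, p.2 + d.2) ∈ pvBfsLoop grid (grid.length : Int) v fuel R frontier) := by
  intro fuel
  induction fuel with
  | zero =>
    intro R frontier hsnd hfr hcl hnd hInB hfuel
    exfalso
    have := pv_card_bound hnd hInB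
    omega
  | succ fuel ih =>
    intro R frontier hsnd hfr hcl hnd hInB hfuel
    match frontier, hfr, hcl with
    | [], _, hcl =>
      refine ⟨fun x h => h, hsnd, ?_⟩
      intro p hp d hd hb he
      exact hcl p hp (List.not_mem_nil) d hd hb he
    | p0 :: fr, hfr, hcl =>
      obtain ⟨o1, o2, o3, o4, o5, o6, o7, o8⟩ :=
        pvBfsOuter_facts grid (grid.length : Int) v (p0 :: fr) (R, ([] : List (Int × Int)))
      simp only [pvBfsLoop]
      have hsnd' : ∀ x ∈ (pvBfsRound grid (grid.length : Int) v (p0 :: fr) R).1,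
          pvRA grid (grid.length : Int) v x := by
        intro x h
        rcases o2 x h with h' | ⟨p, hp, ha, hb, he⟩
        · exact hsnd x h'
        · exact pvRA.step (hsnd p (hfr p hp)) ha hb he
      have hfr' : ∀ p ∈ (pvBfsRound grid (grid.length : Int) v (p0 :: fr) R).2,
          p ∈ (pvBfsRound grid (grid.length : Int) v (p0 :: fr) R).1 := by
        intro p h
        rcases o4 p h with h' | h'
        · exact absurd h' (List.not_mem_nil)
        · exact h'
      have hcl' : ∀ p ∈ (pvBfsRound grid (grid.length : Int) v (p0 :: fr) R).1,
          p ∉ (pvBfsRound grid (grid.length : Int) v (p0 :: fr) R).2 → ∀ d ∈ pvDirs,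
          pvInB (grid.length : Int) (p.1 + d.1, p.2 + d.2) →
          pvElev grid (p.1 + d.1) (p.2 + d.2) ≤ v →
          (p.1 + d.1, p.2 + d.2) ∈ (pvBfsRound grid (grid.length : Int) v (p0 :: fr) R).1 := by
        intro p hp hpnew d hd hb he
        have hpR : p ∈ R := by
          rcases o8 p hp with h' | h'
          · exact h'
          · exact absurd h' hpnew
        by_cases hpfr : p ∈ p0 :: fr
        · exact o3 p hpfr d hd hb he
        · exact o1 _ (hcl p hpR hpfr d hd hb he)
      have hnd' : (pvBfsRound grid (grid.length : Int) v (p0 :: fr) R).1.Nodup := o5 hnd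
      have hInB' : ∀ p ∈ (pvBfsRound grid (grid.length : Int) v (p0 :: fr) R).1,
          pvInB (grid.length : Int) p := by
        intro p h
        rcases o2 p h with h' | ⟨_, _, _, hb, _⟩
        · exact hInB p h'
        · exact hb
      have hlen : (pvBfsRound grid (grid.length : Int) v (p0 :: fr) R).1.length =
          R.length + (pvBfsRound grid (grid.length : Int) v (p0 :: fr) R).2.length := by
        have := o6
        simpa using this
      by_cases hnew : (pvBfsRound grid (grid.length : Int) v (p0 :: fr) R).2 = []
      · have hloop0 : ∀ f : Nat, pvBfsLoop grid (grid.length : Int) v f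
            (pvBfsRound grid (grid.length : Int) v (p0 :: fr) R).1 ([] : List (Int × Int)) =
            (pvBfsRound grid (grid.length : Int) v (p0 :: fr) R).1 := by
          intro f; cases f <;> rfl
        rw [hnew, hloop0 fuel]
        refine ⟨fun x h => o1 x h, hsnd', ?_⟩
        intro p hp d hd hb he
        exact hcl' p hp (by rw [hnew]; exact List.not_mem_nil) d hd hb he
      · have hlen2 : 1 ≤ (pvBfsRound grid (grid.length : Int) v (p0 :: fr) R).2.length :=
          List.length_pos_of_ne_nil hnew
        obtain ⟨c1, c2, c3⟩ := ih (pvBfsRound grid (grid.length : Int) v (p0 :: fr) R).1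
          (pvBfsRound grid (grid.length : Int) v (p0 :: fr) R).2
          hsnd' hfr' hcl' hnd' hInB' (by omega)
        exact ⟨fun x h => c1 x (o1 x h), c2, c3⟩

-- the per-threshold decision of B decides reachability
lemma pvB_decider {grid : List (List Int)} {v : Int} (h0 : 0 < grid.length) :
    pvReachable grid (grid.length : Int) v = true ↔
      pvRA grid (grid.length : Int) v ((grid.length : Int) - 1, (grid.length : Int) - 1) := by
  unfold pvReachable
  by_cases hgt : pvElev grid 0 0 > v
  · rw [if_pos hgt]
    constructor
    · intro h; exact absurd h Bool.false_ne_true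
    · intro hra; exact absurd (pvRA_e00 hra) (not_le.mpr hgt)
  · rw [if_neg hgt]
    have hmemR0 : ∀ x : Int × Int, x ∈ PySem.Set.add PySem.Set.empty ((0 : Int), (0 : Int)) ↔
        x = ((0 : Int), (0 : Int)) := by
      intro x
      rw [PySem.Set.mem_add]
      simp [PySem.Set.empty]
    obtain ⟨c1, c2, c3⟩ := pvBfsLoop_master (v := v) (grid.length * grid.length + 2)
      (PySem.Set.add PySem.Set.empty ((0 : Int), (0 : Int))) [((0 : Int), (0 : Int))]
      (by
        intro x hx
        rw [hmemR0 x] at hx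
        rw [hx]
        exact pvRA.base (not_lt.mp hgt))
      (by
        intro p hp
        rw [List.mem_singleton] at hp
        rw [hmemR0 p]
        exact hp)
      (by
        intro p hp hpfr
        exfalso
        rw [hmemR0 p] at hp
        exact hpfr (List.mem_singleton.mpr hp))
      (PySem.Set.nodup_add _ _ (by simp [PySem.Set.empty]))
      (by
        intro p hp
        rw [hmemR0 p] at hp
        subst hp
        exact ⟨le_refl _, by show (0 : Int) < _; exact_mod_cast h0, le_refl _,
          by show (0 : Int) < _; exact_mod_cast h0⟩)
      (by omega)
    constructor
    · intro hc
      exact c2 _ ((PySem.Set.contains_iff _ _).mp hc)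
    · intro hra
      rw [PySem.Set.contains_iff]
      exact pvRA_in_closed c3 (c1 _ ((hmemR0 _).mpr rfl)) _ hra

-- indexing helpers on the sorted list of thresholds
lemma pv_vals_at {vals : List Int} {i : Nat} (hi : i < vals.length) :
    PySem.List.pyGetD vals (i : Int) 0 = vals[i] := by
  have e := PySem.List.pyGetD_eq_getElem vals (i := (i : Int)) 0 (by positivity)
    (by exact_mod_cast hi)
  simpa using e

lemma pv_vals_mono {vals : List Int} (hs : vals.Pairwise (· < ·)) {a b : Int}
    (h0a : 0 ≤ a) (hab : a ≤ b) (hb : b < (vals.length : Int)) :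
    PySem.List.pyGetD vals a 0 ≤ PySem.List.pyGetD vals b 0 := by
  have e1 := PySem.List.pyGetD_eq_getElem vals (i := a) 0 h0a (by omega)
  have e2 := PySem.List.pyGetD_eq_getElem vals (i := b) 0 (by omega) hb
  rw [e1, e2]
  rcases Nat.lt_or_ge a.toNat b.toNat with hlt | hge
  · exact le_of_lt ((List.pairwise_iff_getElem.mp hs) _ _ (by omega) (by omega) hlt)
  · have heq : a.toNat = b.toNat := by omega
    simp only [heq]
    exact le_refl _

-- the binary search returns the first index whose threshold reaches the corner
lemma pvBSearch_spec {grid : List (List Int)} (h0 : 0 < grid.length) (vals : List Int)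
    (hsortlt : vals.Pairwise (· < ·)) :
    ∀ (fuel : Nat) (lo hi : Int), 0 ≤ lo → lo ≤ hi → hi < (vals.length : Int) →
      (hi - lo).toNat < fuel →
      (∀ i : Int, 0 ≤ i → i < lo →
        ¬ pvRA grid (grid.length : Int) (PySem.List.pyGetD vals i 0)
          ((grid.length : Int) - 1, (grid.length : Int) - 1)) →
      pvRA grid (grid.length : Int) (PySem.List.pyGetD vals hi 0)
        ((grid.length : Int) - 1, (grid.length : Int) - 1) →
      ∃ k : Int, lo ≤ k ∧ k ≤ hi ∧
        pvBSearch grid (grid.length : Int) vals fuel lo hi = PySem.List.pyGetD vals k 0 ∧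
        pvRA grid (grid.length : Int) (PySem.List.pyGetD vals k 0)
          ((grid.length : Int) - 1, (grid.length : Int) - 1) ∧
        (∀ i : Int, 0 ≤ i → i < k →
          ¬ pvRA grid (grid.length : Int) (PySem.List.pyGetD vals i 0)
            ((grid.length : Int) - 1, (grid.length : Int) - 1)) := by
  intro fuel
  induction fuel with
  | zero => intro lo hi _ _ _ hf _ _; omega
  | succ fuel ih =>
    intro lo hi hlo0 hlohi hhilen hf hlow hhira
    by_cases hlh : lo < hi
    · have hmb := PySem.Int.floordiv_two_mid_bounds hlohi
      have hmlt : PySem.Int.floordiv (lo + hi) 2 < hi := by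
        rw [PySem.Int.floordiv_lt_iff_lt_mul (by omega)]
        omega
      simp only [pvBSearch]
      rw [if_pos hlh]
      by_cases hP : pvReachable grid (grid.length : Int)
          (PySem.List.pyGetD vals (PySem.Int.floordiv (lo + hi) 2) 0) = true
      · rw [if_pos hP]
        have hra_mid := (pvB_decider h0).mp hP
        obtain ⟨k, hk1, hk2, hk3, hk4, hk5⟩ :=
          ih lo (PySem.Int.floordiv (lo + hi) 2) hlo0 hmb.1 (by omega) (by omega) hlow hra_mid
        exact ⟨k, hk1, by omega, hk3, hk4, hk5⟩
      · rw [if_neg hP]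
        have hnot : ¬ pvRA grid (grid.length : Int)
            (PySem.List.pyGetD vals (PySem.Int.floordiv (lo + hi) 2) 0)
            ((grid.length : Int) - 1, (grid.length : Int) - 1) :=
          fun hra => hP ((pvB_decider h0).mpr hra)
        have hlow' : ∀ i : Int, 0 ≤ i → i < PySem.Int.floordiv (lo + hi) 2 + 1 →
            ¬ pvRA grid (grid.length : Int) (PySem.List.pyGetD vals i 0)
              ((grid.length : Int) - 1, (grid.length : Int) - 1) := by
          intro i hi0 hik
          by_cases hil : i < lo
          · exact hlow i hi0 hil
          · -- lo ≤ i ≤ mid: monotonicity pushes reachability up to mid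
            intro hra
            apply hnot
            have hile : i ≤ PySem.Int.floordiv (lo + hi) 2 := by omega
            have hvle : PySem.List.pyGetD vals i 0 ≤
                PySem.List.pyGetD vals (PySem.Int.floordiv (lo + hi) 2) 0 :=
              pv_vals_mono hsortlt hi0 hile (by omega)
            exact pvRA_mono hra hvle
        obtain ⟨k, hk1, hk2, hk3, hk4, hk5⟩ :=
          ih (PySem.Int.floordiv (lo + hi) 2 + 1) hi (by omega) (by omega) hhilen
            (by omega) hlow' hhira
        exact ⟨k, by omega, hk2, hk3, hk4, hk5⟩
    · have hloeq : lo = hi := by omega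
      simp only [pvBSearch]
      rw [if_neg hlh]
      subst hloeq
      exact ⟨lo, le_refl _, le_refl _, rfl, hhira, hlow⟩

-- characterization of B's value: reachable, and minimal among all reachability thresholds
lemma pvB_char {grid : List (List Int)} (h0 : 0 < grid.length) :
    pvRA grid (grid.length : Int) (find_min_time_to_reach_bottom_right_alt grid)
        ((grid.length : Int) - 1, (grid.length : Int) - 1) ∧
      ∀ T, pvRA grid (grid.length : Int) T ((grid.length : Int) - 1, (grid.length : Int) - 1) →
        find_min_time_to_reach_bottom_right_alt grid ≤ T := by
  obtain ⟨Tbig, hTbig⟩ := pvRA_exists h0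
  set vals := PySem.List.sorted (PySem.Set.ofList (pvAllVals grid)) (fun x => x) with hvals
  have hsortlt : vals.Pairwise (· < ·) := PySem.List.sorted_ofList_pairwise_lt _
  obtain ⟨v0, hm0, _, hra0⟩ := pvRA_maxval h0 hTbig
  have hv0mem : v0 ∈ vals :=
    (PySem.List.mem_sorted _ _ _ _).mpr ((PySem.Set.mem_ofList _ _).mpr hm0)
  have hlen1 : 1 ≤ vals.length := List.length_pos_of_mem hv0mem
  -- an index-membership bridge for elements of vals
  have hidx : ∀ w ∈ vals, ∃ i : Nat, i < vals.length ∧ vals[i]? = some w := by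
    intro w hw
    obtain ⟨i, hi, hieq⟩ := List.mem_iff_getElem.mp hw
    exact ⟨i, hi, by rw [List.getElem?_eq_getElem hi, hieq]⟩
  -- the last element dominates every member, so it reaches the corner
  have hlast : pvRA grid (grid.length : Int)
      (PySem.List.pyGetD vals ((vals.length : Int) - 1) 0)
      ((grid.length : Int) - 1, (grid.length : Int) - 1) := by
    obtain ⟨i0, hi0, hi0eq⟩ := List.mem_iff_getElem.mp hv0mem
    have hle : v0 ≤ PySem.List.pyGetD vals ((vals.length : Int) - 1) 0 := by
      rw [← hi0eq, ← pv_vals_at hi0]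
      exact pv_vals_mono hsortlt (by positivity) (by omega) (by omega)
    exact pvRA_mono hra0 hle
  obtain ⟨k, hk1, hk2, hk3, hk4, hk5⟩ := pvBSearch_spec h0 vals hsortlt (vals.length + 1)
    0 ((vals.length : Int) - 1) (le_refl _) (by omega) (by omega) (by omega)
    (by intro i h1 h2; omega) hlast
  have halt : find_min_time_to_reach_bottom_right_alt grid = PySem.List.pyGetD vals k 0 := by
    simp only [find_min_time_to_reach_bottom_right_alt]
    exact hk3
  constructor
  · rw [halt]; exact hk4
  · intro T hT
    obtain ⟨w, hwm, hwle, hwra⟩ := pvRA_maxval h0 hT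
    have hwmem : w ∈ vals :=
      (PySem.List.mem_sorted _ _ _ _).mpr ((PySem.Set.mem_ofList _ _).mpr hwm)
    obtain ⟨i, hi, hieq⟩ := List.mem_iff_getElem.mp hwmem
    have hki : k ≤ (i : Int) := by
      by_contra hnk
      apply hk5 (i : Int) (by positivity) (by omega)
      rw [pv_vals_at hi, hieq]
      exact hwra
    have hvk : PySem.List.pyGetD vals k 0 ≤ w := by
      rw [← hieq, ← pv_vals_at hi]
      exact pv_vals_mono hsortlt (by omega) hki (by omega)
    rw [halt]
    omega

-- the master invariant lemma for A's loop
lemma pvALoop_master {grid : List (List Int)} {ans : Int}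
    (hra : pvRA grid (grid.length : Int) ans ((grid.length : Int) - 1, (grid.length : Int) - 1))
    (hmin : ∀ T, pvRA grid (grid.length : Int) T ((grid.length : Int) - 1, (grid.length : Int) - 1) → ans ≤ T) :
    ∀ (fuel : Nat) (heap : List (Int × Int × Int)) (visited : List (Int × Int)),
      heap.Pairwise (fun a b => pvLexLe a b = true) →
      (∀ e ∈ heap, pvInB (grid.length : Int) (e.2.1, e.2.2) ∧ pvRA grid (grid.length : Int) e.1 (e.2.1, e.2.2)) →
      (∀ T, pvRA grid (grid.length : Int) T ((grid.length : Int) - 1, (grid.length : Int) - 1) →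
        ∃ t' y, (t', y.1, y.2) ∈ heap ∧ t' ≤ T ∧ y ∉ visited ∧
          pvChain grid (grid.length : Int) T visited y ((grid.length : Int) - 1, (grid.length : Int) - 1)) →
      visited.Nodup → (∀ p ∈ visited, pvInB (grid.length : Int) p) →
      ((grid.length : Int) - 1, (grid.length : Int) - 1) ∉ visited →
      heap.length + 5 * (grid.length * grid.length - visited.length) < fuel →
      pvALoop grid (grid.length : Int) fuel heap visited = ans := by
  intro fuel
  induction fuel with
  | zero => intro heap visited _ _ _ _ _ _ hfuel; omega
  | succ fuel ih =>
    intro heap visited hsort hI1 hJ hnd hvb htgtv hfuel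
    match heap, hsort, hI1, hJ, hfuel with
    | [], _, _, hJ, _ =>
      obtain ⟨t', y, hmem, _, _, _⟩ := hJ ans hra
      exact absurd hmem (List.not_mem_nil)
    | (t, r, c) :: rest, hsort, hI1, hJ, hfuel =>
      simp only [pvALoop]
      by_cases htc : r = (grid.length : Int) - 1 ∧ c = (grid.length : Int) - 1
      · rw [if_pos (by simp [htc.1, htc.2])]
        -- the popped entry is the target: its key equals ans
        have hhead := hI1 (t, r, c) List.mem_cons_self
        have hrat : pvRA grid (grid.length : Int) t ((grid.length : Int) - 1, (grid.length : Int) - 1) := by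
          have := hhead.2
          simpa [htc.1, htc.2] using this
        have h1 : ans ≤ t := hmin t hrat
        obtain ⟨t', y, hmem, ht'le, _, _⟩ := hJ ans hra
        have h2 : t ≤ t' := by
          rcases List.mem_cons.mp hmem with heq | hmemr
          · have : t' = t := congrArg Prod.fst heq
            omega
          · have := (List.pairwise_cons.mp hsort).1 _ hmemr
            exact pvLexLe_fst this
        omega
      · rw [if_neg (by simpa using htc)]
        have htgt_ne : ((grid.length : Int) - 1, (grid.length : Int) - 1) ≠ (r, c) := by
          intro h
          exact htc ⟨(congrArg Prod.fst h).symm, (congrArg Prod.snd h).symm⟩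
        by_cases hvis : PySem.Set.contains visited (r, c) = true
        · rw [if_pos hvis]
          refine ih rest visited (List.pairwise_cons.mp hsort).2
            (fun e he => hI1 e (List.mem_cons_of_mem _ he)) ?_ hnd hvb htgtv (by
              simp only [List.length_cons] at hfuel; omega)
          intro T hT
          obtain ⟨t', y, hmem, ht'le, hyv, hch⟩ := hJ T hT
          rcases List.mem_cons.mp hmem with heq | hmemr
          · exfalso
            apply hyv
            have h1 : y.1 = r := congrArg (fun z => z.2.1) heq
            have h2 : y.2 = c := congrArg (fun z => z.2.2) heq
            have : y = (r, c) := Prod.ext h1 h2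
            rw [this]
            exact (PySem.Set.contains_iff _ _).mp hvis
          · exact ⟨t', y, hmemr, ht'le, hyv, hch⟩
        · rw [if_neg hvis]
          have hrc_not : (r, c) ∉ visited :=
            fun hm => hvis ((PySem.Set.contains_iff _ _).mpr hm)
          have hadd : PySem.Set.add visited (r, c) = visited ++ [(r, c)] := by
            simp [PySem.Set.add, hrc_not]
          simp only [hadd]
          have hrcInB : pvInB (grid.length : Int) (r, c) :=
            (hI1 (t, r, c) List.mem_cons_self).1
          have hrcRA : pvRA grid (grid.length : Int) t (r, c) :=
            (hI1 (t, r, c) List.mem_cons_self).2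
          set V' : List (Int × Int) := visited ++ [(r, c)] with hV'
          set g : Int × Int → Bool := fun d =>
            (0 ≤ r + d.1 && r + d.1 < (grid.length : Int) && 0 ≤ c + d.2 &&
              c + d.2 < (grid.length : Int)) && !(PySem.Set.contains V' (r + d.1, c + d.2)) with hg
          set e : Int × Int → Int × Int × Int := fun d =>
            (max t (pvElev grid (r + d.1) (c + d.2)), r + d.1, c + d.2) with he
          have hndV' : V'.Nodup := by
            rw [hV']
            simp only [List.nodup_append, List.nodup_singleton, true_and]
            refine ⟨hnd, ?_⟩
            intro a ha b hb heq
            rw [List.mem_singleton] at hb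
            subst hb; subst heq
            exact hrc_not ha
          have hvbV' : ∀ p ∈ V', pvInB (grid.length : Int) p := by
            intro p hp
            rcases List.mem_append.mp hp with h | h
            · exact hvb p h
            · rw [List.mem_singleton] at h
              subst h
              exact hrcInB
          have htgtV' : ((grid.length : Int) - 1, (grid.length : Int) - 1) ∉ V' := by
            intro hmem
            rcases List.mem_append.mp hmem with h | h
            · exact htgtv h
            · rw [List.mem_singleton] at h
              exact htgt_ne h
          show pvALoop grid (grid.length : Int) fuel
            (pvDirs.foldl (fun h d => if g d then pvHeapPush (e d) h else h) rest) V' = ans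
          refine ih _ V' ?_ ?_ ?_ hndV' hvbV' htgtV' ?_
          · exact pvFoldPush_sorted _ _ (List.pairwise_cons.mp hsort).2
          · -- I1 for the new heap
            intro e' he'
            rcases pvFoldPush_char _ _ _ he' with hr | ⟨d, hd, hgd, rfl⟩
            · exact hI1 e' (List.mem_cons_of_mem _ hr)
            · rw [hg] at hgd
              rw [Bool.and_eq_true] at hgd
              have hbnd : pvInB (grid.length : Int) (r + d.1, c + d.2) := pvInB_bool.mp hgd.1
              refine ⟨hbnd, ?_⟩
              exact pvRA.step (pvRA_mono hrcRA (le_max_left _ _)) ⟨d, hd, rfl⟩ hbnd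
                (le_max_right _ _)
          · -- the frontier invariant
            intro T hT
            obtain ⟨t', y, hmem, ht'le, hyv, hch⟩ := hJ T hT
            have htT : t ≤ T := by
              have h2 : t ≤ t' := by
                rcases List.mem_cons.mp hmem with heq | hmemr
                · have : t' = t := congrArg Prod.fst heq
                  omega
                · exact pvLexLe_fst ((List.pairwise_cons.mp hsort).1 _ hmemr)
              omega
            rcases pvChain_extend (p := (r, c)) hch htgt_ne with ⟨hyne, hch'⟩ |
              ⟨w, haw, hbw, hew, hwv', hchw⟩
            · -- the old witness survives
              have hmemr : (t', y.1, y.2) ∈ rest := by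
                rcases List.mem_cons.mp hmem with heq | h
                · exfalso
                  apply hyne
                  exact Prod.ext (congrArg (fun z => z.2.1) heq) (congrArg (fun z => z.2.2) heq)
                · exact h
              refine ⟨t', y, pvFoldPush_mem_acc _ _ _ hmemr, ht'le, ?_, hch'⟩
              intro hy
              rcases List.mem_append.mp hy with h | h
              · exact hyv h
              · rw [List.mem_singleton] at h
                exact hyne h
            · -- a freshly pushed neighbour is the new witness
              obtain ⟨d, hd, hweq⟩ := haw
              subst hweq
              have hgd : g d = true := by
                rw [hg]
                rw [Bool.and_eq_true]
                constructor
                · exact pvInB_bool.mpr hbw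
                · rw [Bool.not_eq_true']
                  exact Bool.eq_false_iff.mpr
                    (fun hc => hwv' ((PySem.Set.contains_iff _ _).mp hc))
              refine ⟨max t (pvElev grid (r + d.1) (c + d.2)), (r + d.1, c + d.2), ?_, ?_, hwv', hchw⟩
              · exact pvFoldPush_pushed _ _ hd hgd
              · exact max_le htT hew
          · -- fuel bound
            have hlen := pvFoldPush_len (g := g) (e := e) pvDirs rest
            have hdirs : pvDirs.length = 4 := rfl
            have hcard : V'.length ≤ grid.length * grid.length := pv_card_bound hndV' hvbV'
            have hVlen : V'.length = visited.length + 1 := by simp [hV']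
            simp only [List.length_cons] at hfuel
            omega

-- ===== VERDICT (by name: the statement is the Claim_ definition above) =====
theorem find_min_time_to_reach_bottom_right_spec : Claim_equal_find_min_time_to_reach_bottom_right := by
  intro grid _ hpre
  unfold Spec_find_min_time_to_reach_bottom_right
  obtain ⟨hne, _⟩ := hpre
  have h0 : 0 < grid.length := List.length_pos_of_ne_nil hne
  obtain ⟨hra, hmin⟩ := pvB_char (grid := grid) h0
  show find_min_time_to_reach_bottom_right grid = _
  simp only [find_min_time_to_reach_bottom_right]
  refine pvALoop_master hra hmin (2 + 5 * grid.length * grid.length) _ _ ?_ ?_ ?_ ?_ ?_ ?_ ?_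
  · simp
  · intro e' he'
    rw [List.mem_singleton] at he'
    subst he'
    exact ⟨⟨le_refl _, by show (0 : Int) < _; exact_mod_cast h0, le_refl _,
      by show (0 : Int) < _; exact_mod_cast h0⟩, pvRA.base (le_refl _)⟩
  · intro T hT
    exact ⟨pvElev grid 0 0, ((0 : Int), (0 : Int)), List.mem_singleton.mpr rfl,
      pvRA_e00 hT, List.not_mem_nil, pvRA_chain hT⟩
  · exact List.nodup_nil
  · intro p hp
    exact absurd hp (List.not_mem_nil)
  · exact List.not_mem_nil
  · show 1 + 5 * (grid.length * grid.length - ([] : List (Int × Int)).length) <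
      2 + 5 * grid.length * grid.length
    rw [Nat.mul_assoc]
    simp only [List.length_nil]
    omega
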